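-- pv_equiv track=rewrite | github.com/yassine-turki/Polytechnique_Courses | CS/CSE202/TD_2/mult (2).py | cost_poly_tc3_mult
-- ===== SOURCE A (Python) =====
-- def cost_poly_tc3_mult(n):
--     if n == 1:
--         return 1
--     elif n == 2:
--         return 3
--     else:
--         return 5 * cost_poly_tc3_mult((n+2)//3) + 30 *n
--     pass
-- ===== SOURCE B (Python) =====
-- def cost_poly_tc3_mult(n):
--     chain = []
--     while n != 1 and n != 2:
--         chain.append(n)
--         n = (n + 2) // 3
--     result = 1 if n == 1 else 3
--     for v in reversed(chain):
--         result = 5 * result + 30 * v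
--     return result
-- ===== Notes on version B (the rewrite author's own statement) =====
-- stated objective: alternative
-- what changed: Replaces the recursive evaluation of the cost recurrence by an iterative one: a while loop collects the chain of intermediate n values down to the base case, then a reverse fold accumulates 5*result + 30*v.
import Mathlib
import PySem

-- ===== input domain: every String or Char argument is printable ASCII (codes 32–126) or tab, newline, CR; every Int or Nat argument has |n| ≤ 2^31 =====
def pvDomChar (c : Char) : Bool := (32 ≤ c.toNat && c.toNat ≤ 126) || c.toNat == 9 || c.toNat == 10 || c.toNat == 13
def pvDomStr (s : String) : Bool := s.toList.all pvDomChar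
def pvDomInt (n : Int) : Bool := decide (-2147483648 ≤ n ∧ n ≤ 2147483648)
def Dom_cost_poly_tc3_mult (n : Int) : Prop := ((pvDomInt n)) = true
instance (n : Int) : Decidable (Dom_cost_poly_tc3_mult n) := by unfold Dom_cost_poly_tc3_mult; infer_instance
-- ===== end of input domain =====

-- B evaluates the same recurrence iteratively (collect the chain, fold back) instead of recursively; same cost.
-- ===== PORT A =====
-- termination guard: the 'else 0' branch for n ≤ 0 is unreachable inside Pre_ (Python A
-- raises RecursionError there); it only makes the recursion well-founded.
def cost_poly_tc3_mult (n : Int) : Int :=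
  if n = 1 then 1
  else if n = 2 then 3
  else if 3 ≤ n then 5 * cost_poly_tc3_mult (PySem.Int.floordiv (n + 2) 3) + 30 * n
  else 0
termination_by n.toNat
decreasing_by
  rw [PySem.Int.floordiv_eq_ediv_of_pos (by omega)]
  omega

-- ===== PORT B =====
-- the while loop of Source B: returns (chain of pushed values, base result)
-- (same totality guard for n ≤ 0, where Source B's loop never exits; outside Pre_)
def pvChain (n : Int) : List Int × Int :=
  if n = 1 then ([], 1)
  else if n = 2 then ([], 3)
  else if 3 ≤ n then
    let r := pvChain (PySem.Int.floordiv (n + 2) 3)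
    (n :: r.1, r.2)
  else ([], 0)
termination_by n.toNat
decreasing_by
  rw [PySem.Int.floordiv_eq_ediv_of_pos (by omega)]
  omega

def cost_poly_tc3_mult_alt (n : Int) : Int :=
  let r := pvChain n
  r.1.reverse.foldl (fun result v => 5 * result + 30 * v) r.2

-- ===== PRECONDITION & SPEC =====
-- Pre_ excludes n ≤ 0, on which A never reaches a base case and raises RecursionError.
def Pre_cost_poly_tc3_mult (n : Int) : Prop := 1 ≤ n
instance (n : Int) : Decidable (Pre_cost_poly_tc3_mult n) := by unfold Pre_cost_poly_tc3_mult; infer_instance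
def pvWitness_cost_poly_tc3_mult : Int := 7
def Spec_cost_poly_tc3_mult (n : Int) (out : Int) : Prop := out = cost_poly_tc3_mult_alt n
instance (n : Int) (out : Int) : Decidable (Spec_cost_poly_tc3_mult n out) := by unfold Spec_cost_poly_tc3_mult; infer_instance

-- ===== CLAIM (what is proved, stated in full; the proofs are below) =====
def Claim_equal_cost_poly_tc3_mult : Prop := ∀ (n : Int), Dom_cost_poly_tc3_mult n → Pre_cost_poly_tc3_mult n → Spec_cost_poly_tc3_mult n (cost_poly_tc3_mult n)

-- ===== LEMMAS AND PROOFS =====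

theorem alt_eq_cost (n : Int) : 1 ≤ n → cost_poly_tc3_mult_alt n = cost_poly_tc3_mult n := by
  induction n using cost_poly_tc3_mult.induct with
  | case1 => intro _; simp [cost_poly_tc3_mult_alt, pvChain, cost_poly_tc3_mult]
  | case2 h1 => intro _; simp [cost_poly_tc3_mult_alt, pvChain, cost_poly_tc3_mult, h1]
  | case3 x h1 h2 h3 ih =>
    intro _
    have hm : (1 : Int) ≤ PySem.Int.floordiv (x + 2) 3 := by
      rw [PySem.Int.floordiv_eq_ediv_of_pos (by omega)]; omega
    have hrec := ih hm
    simp only [cost_poly_tc3_mult_alt] at hrec ⊢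
    rw [pvChain, cost_poly_tc3_mult]
    simp only [h1, h2, h3, if_false, if_true]
    simp only [List.reverse_cons, List.foldl_append, List.foldl_cons, List.foldl_nil]
    rw [hrec]
  | case4 x h1 h2 h3 => intro h; omega

theorem cost_poly_tc3_mult_spec : Claim_equal_cost_poly_tc3_mult := by
  intro n _ hpre
  unfold Spec_cost_poly_tc3_mult
  exact (alt_eq_cost n hpre).symm
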